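-- pv_equiv track=rewrite | github.com/danielIonita2022/Web-Scraping | StockExchange/StockExchange.py | putNewline
-- ===== SOURCE A (Python) =====
-- def putNewline(string):
--     newString = ''
--     markAlpha = False
--     for letter in string:
--         if letter.isdigit() is True:
--             if markAlpha is True:
--                 newString += ':\n'
--                 markAlpha = False
--         else:
--             markAlpha = letter.isalpha()
--         newString += letter
--     return newString
-- ===== SOURCE B (Python) =====
-- def putNewline(string):
--     # Stateless pairwise scan: ':\n' goes exactly between an alpha char and a digit char.
--     if not string:
--         return ''
--     parts = [string[0]]
--     for a, b in zip(string, string[1:]):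
--         if a.isalpha() and b.isdigit():
--             parts.append(':\n')
--         parts.append(b)
--     return ''.join(parts)
-- ===== Notes on version B (the rewrite author's own statement) =====
-- stated objective: simpler
-- what changed: Replaces A's markAlpha boolean-flag state machine with a stateless scan over consecutive character pairs (zip of the string with its tail), inserting the colon-newline separator exactly at each alpha-to-digit boundary.
import Mathlib
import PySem

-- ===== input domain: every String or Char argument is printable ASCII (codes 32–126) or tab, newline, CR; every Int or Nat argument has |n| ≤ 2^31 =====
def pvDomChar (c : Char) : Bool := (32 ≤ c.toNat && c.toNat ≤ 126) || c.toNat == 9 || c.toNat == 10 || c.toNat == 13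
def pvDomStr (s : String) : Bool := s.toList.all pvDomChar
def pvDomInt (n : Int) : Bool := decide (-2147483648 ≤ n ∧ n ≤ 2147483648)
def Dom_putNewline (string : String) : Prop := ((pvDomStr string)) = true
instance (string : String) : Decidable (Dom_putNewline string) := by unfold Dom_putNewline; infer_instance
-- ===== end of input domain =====

-- B replaces A's boolean-flag state machine by a stateless pairwise scan; objective: simpler.

-- ===== PORT A =====
-- one iteration of A's for-loop: state = (newString, markAlpha)
def pvStepA (st : List Char × Bool) (letter : Char) : List Char × Bool :=
  if PySem.Chars.isdigit letter = true then
    if st.2 = true then (st.1 ++ [':', '\n'] ++ [letter], false)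
    else (st.1 ++ [letter], st.2)
  else (st.1 ++ [letter], PySem.Chars.isalpha letter)

def putNewline (string : String) : String :=
  String.mk (string.toList.foldl pvStepA ([], false)).1

-- ===== PORT B =====
-- one iteration of B's for-loop over zip(string, string[1:]); parts is the list of appended pieces
def pvStepB (parts : List (List Char)) (p : Char × Char) : List (List Char) :=
  let parts := if PySem.Chars.isalpha p.1 && PySem.Chars.isdigit p.2 then parts ++ [[':', '\n']] else parts
  parts ++ [[p.2]]

def putNewline_alt (string : String) : String :=
  match string.toList with
  | [] => ""
  | c :: rest =>
    String.mk (PySem.Chars.join [] (((c :: rest).zip rest).foldl pvStepB [[c]]))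

-- ===== PRECONDITION & SPEC =====
def Spec_putNewline (string : String) (out : String) : Prop := out = putNewline_alt string
instance (string : String) (out : String) : Decidable (Spec_putNewline string out) := by unfold Spec_putNewline; infer_instance

-- ===== CLAIM (what is proved, stated in full; the proofs are below) =====
def Claim_equal_putNewline : Prop := ∀ (string : String), Dom_putNewline string → Spec_putNewline string (putNewline string)

-- ===== LEMMAS AND PROOFS =====

theorem pv_not_alpha_of_digit (c : Char) (h : PySem.Chars.isdigit c = true) :
    PySem.Chars.isalpha c = false := by
  simp only [PySem.Chars.isdigit, Bool.and_eq_true, decide_eq_true_eq, Char.le_def,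
    UInt32.le_iff_toNat_le] at h
  simp only [PySem.Chars.isalpha, PySem.Chars.isupper, PySem.Chars.islower, Char.le_def,
    UInt32.le_iff_toNat_le, Bool.or_eq_false_iff, Bool.and_eq_false_iff,
    decide_eq_false_iff_not, not_le]
  have h0 : ('0' : Char).val.toNat = 48 := rfl
  have h9 : ('9' : Char).val.toNat = 57 := rfl
  have hA : ('A' : Char).val.toNat = 65 := rfl
  have hZ : ('Z' : Char).val.toNat = 90 := rfl
  have ha : ('a' : Char).val.toNat = 97 := rfl
  have hz : ('z' : Char).val.toNat = 122 := rfl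
  omega

theorem pv_foldA_acc (l : List Char) (acc : List Char) (b : Bool) :
    (l.foldl pvStepA (acc, b)).1 = acc ++ (l.foldl pvStepA ([], b)).1 := by
  induction l generalizing acc b with
  | nil => simp
  | cons x t ih =>
    simp only [List.foldl_cons, pvStepA]
    split_ifs with h1 h2
    · conv_rhs => rw [ih]
      rw [ih]; simp
    · conv_rhs => rw [ih]
      rw [ih]; simp
    · conv_rhs => rw [ih]
      rw [ih]; simp

theorem pv_foldB_acc (l : List (Char × Char)) (acc : List (List Char)) :
    l.foldl pvStepB acc = acc ++ l.foldl pvStepB [] := by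
  induction l generalizing acc with
  | nil => simp
  | cons x t ih =>
    simp only [List.foldl_cons, pvStepB]
    split_ifs with h1
    · conv_rhs => rw [ih]
      rw [ih]; simp
    · conv_rhs => rw [ih]
      rw [ih]; simp

theorem pv_join_empty_sep (l : List (List Char)) :
    PySem.Chars.join [] l = l.flatten := by
  induction l with
  | nil => exact PySem.Chars.join_nil []
  | cons p rest ih =>
    cases rest with
    | nil => simp [PySem.Chars.join_singleton]
    | cons q t => rw [PySem.Chars.join_cons_cons]; simp [ih]

theorem pv_main (l : List Char) (prev : Char) :
    (l.foldl pvStepA ([], PySem.Chars.isalpha prev)).1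
      = (((prev :: l).zip l).foldl pvStepB []).flatten := by
  induction l generalizing prev with
  | nil => rfl
  | cons x t ih =>
    simp only [List.zip_cons_cons, List.foldl_cons]
    rw [pv_foldB_acc _ (pvStepB [] (prev, x))]
    by_cases hd : PySem.Chars.isdigit x = true
    · have hax : PySem.Chars.isalpha x = false := pv_not_alpha_of_digit x hd
      by_cases hp : PySem.Chars.isalpha prev = true
      · simp only [pvStepA, hd, hp, if_true]
        rw [pv_foldA_acc]
        have : (false : Bool) = PySem.Chars.isalpha x := hax.symm
        rw [this, ih x]
        simp [pvStepB, hp, hd]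
      · simp only [Bool.not_eq_true] at hp
        simp only [pvStepA, hd, hp, if_true, Bool.false_eq_true, if_false]
        rw [pv_foldA_acc]
        have hfx : (false : Bool) = PySem.Chars.isalpha x := hax.symm
        rw [hfx, ih x]
        simp [pvStepB, hp, hd]
    · simp only [pvStepA, if_neg hd]
      rw [pv_foldA_acc, ih x]
      simp only [Bool.not_eq_true] at hd
      simp [pvStepB, hd]

theorem pv_first_step (c : Char) :
    pvStepA ([], false) c = ([c], PySem.Chars.isalpha c) := by
  simp only [pvStepA]
  by_cases hd : PySem.Chars.isdigit c = true
  · simp [hd, pv_not_alpha_of_digit c hd]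
  · simp [hd]

-- ===== VERDICT (by name: the statement is the Claim_ definition above) =====
theorem putNewline_spec : Claim_equal_putNewline := by
  intro s _
  unfold Spec_putNewline putNewline putNewline_alt
  cases h : s.toList with
  | nil => rfl
  | cons c rest =>
    simp only [List.foldl_cons, pv_first_step]
    rw [pv_foldA_acc, pv_main rest c, pv_join_empty_sep,
      pv_foldB_acc _ [[c]]]
    simp
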